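-- pv_equiv track=rewrite | github.com/KuramitsuLab/pegtree | pegtree/pasm.py | tochars
-- ===== SOURCE A (Python) =====
-- def tochars(chars, ranges):
--     cs = set(list(chars))
--     rs = ranges
--     while len(rs) > 0:
--         r = range(ord(rs[0]), ord(rs[1])+1)
--         cs |= set(map(chr, r))
--         rs = rs[2:]
--     return ''.join(sorted(cs))
-- ===== SOURCE B (Python) =====
-- def tochars(chars, ranges):
--     # Collect code points, then emit them by scanning the span min..max in order (no sort).
--     pts = set(map(ord, chars))
--     rs = ranges
--     while len(rs) > 0:
--         pts.update(range(ord(rs[0]), ord(rs[1]) + 1))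
--         rs = rs[2:]
--     if not pts:
--         return ''
--     mn = min(pts)
--     mx = max(pts)
--     return ''.join(chr(c) for c in range(mn, mx + 1) if c in pts)
-- ===== Notes on version B (the rewrite author's own statement) =====
-- stated objective: alternative
-- what changed: B collects code points into a set, tracks min/max, and emits the result by scanning the code-point span in increasing order and filtering by membership, instead of A's build-a-char-set-then-sort; the sort call disappears.
import Mathlib
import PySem

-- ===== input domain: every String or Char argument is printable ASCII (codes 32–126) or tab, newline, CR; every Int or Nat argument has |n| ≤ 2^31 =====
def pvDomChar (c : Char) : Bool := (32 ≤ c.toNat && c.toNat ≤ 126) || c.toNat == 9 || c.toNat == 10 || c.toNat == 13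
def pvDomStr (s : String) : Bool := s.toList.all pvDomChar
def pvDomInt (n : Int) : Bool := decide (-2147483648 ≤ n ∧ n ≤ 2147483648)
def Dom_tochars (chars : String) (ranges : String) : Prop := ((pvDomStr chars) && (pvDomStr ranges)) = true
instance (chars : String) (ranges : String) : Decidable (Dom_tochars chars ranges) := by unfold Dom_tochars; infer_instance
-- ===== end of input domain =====

-- B collects code points and emits them by an in-order scan of the span min..max instead of sorting (objective: alternative).

-- ord(c); exact for every Char
def pyOrd (c : Char) : Int := (c.toNat : Int)
-- chr(n); exact for 0 ≤ n < 0x110000 (Dom keeps every code point involved ≤ 126)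
def pyChr (n : Int) : Char := Char.ofNat n.toNat

-- ===== PORT A =====
-- the 'while len(rs) > 0' loop; rs[1] on an odd tail raises IndexError in Python (excluded by Pre_)
def tocharsLoop (rs : List Char) (cs : PySem.Set Char) : PySem.Set Char :=
  match rs with
  | r0 :: r1 :: rest =>
      tocharsLoop rest (PySem.Set.union cs ((PySem.List.pyRange (pyOrd r0) (pyOrd r1 + 1) 1).map pyChr))
  | _ => cs

def tochars (chars : String) (ranges : String) : String :=
  String.ofList (PySem.List.sorted (tocharsLoop ranges.toList (PySem.Set.ofList chars.toList)) (fun x => x) false)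

-- ===== PORT B =====
-- the 'while len(rs) > 0: pts.update(range(...))' loop of Source B
def tocharsAltLoop (rs : List Char) (pts : PySem.Set Int) : PySem.Set Int :=
  match rs with
  | r0 :: r1 :: rest =>
      tocharsAltLoop rest (PySem.Set.update pts (PySem.List.pyRange (pyOrd r0) (pyOrd r1 + 1) 1))
  | _ => pts

def tochars_alt (chars : String) (ranges : String) : String :=
  let pts := tocharsAltLoop ranges.toList (PySem.Set.ofList (chars.toList.map pyOrd))
  if pts = [] then ""
  else
    let mn := (PySem.List.min? pts (fun x => x)).getD 0
    let mx := (PySem.List.max? pts (fun x => x)).getD 0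
    String.ofList (((PySem.List.pyRange mn (mx + 1) 1).filter (fun c => pts.contains c)).map pyChr)

-- ===== PRECONDITION & SPEC =====
-- Pre_ excludes exactly the inputs where A raises IndexError: an odd-length ranges string.
def Pre_tochars (_chars : String) (ranges : String) : Prop := ranges.toList.length % 2 = 0
instance (chars : String) (ranges : String) : Decidable (Pre_tochars chars ranges) := by unfold Pre_tochars; infer_instance
def pvWitness_tochars : String × String := ("ca", "fi")

def Spec_tochars (chars : String) (ranges : String) (out : String) : Prop := out = tochars_alt chars ranges
instance (chars : String) (ranges : String) (out : String) : Decidable (Spec_tochars chars ranges out) := by unfold Spec_tochars; infer_instance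

-- ===== CLAIM (what is proved, stated in full; the proofs are below) =====
def Claim_equal_tochars : Prop := ∀ (chars : String) (ranges : String), Dom_tochars chars ranges → Pre_tochars chars ranges → Spec_tochars chars ranges (tochars chars ranges)

-- ===== LEMMAS AND PROOFS =====

-- concatenation of all the code-point ranges named by consecutive pairs of rs
def pairsRanges : List Char → List Int
  | r0 :: r1 :: rest => PySem.List.pyRange (pyOrd r0) (pyOrd r1 + 1) 1 ++ pairsRanges rest
  | _ => []

theorem pyChr_pyOrd (c : Char) : pyChr (pyOrd c) = c := by
  simp [pyChr, pyOrd]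

theorem pyOrd_pyChr (n : Int) (h0 : 0 ≤ n) (h1 : n ≤ 126) : pyOrd (pyChr n) = n := by
  have hv : Nat.isValidChar n.toNat := Or.inl (by omega)
  simp [pyChr, pyOrd, Char.toNat_ofNat, hv]
  omega

theorem pyChr_lt_pyChr (a b : Int) (h0 : 0 ≤ a) (hab : a < b) (h1 : b ≤ 126) : pyChr a < pyChr b := by
  have ha := pyOrd_pyChr a h0 (by omega)
  have hb := pyOrd_pyChr b (by omega) h1
  simp only [pyOrd] at ha hb
  exact Char.lt_def.mpr (UInt32.lt_iff_toNat_lt.mpr (by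
    show (pyChr a).toNat < (pyChr b).toNat
    omega))

theorem mem_tocharsLoop (rs : List Char) (cs : PySem.Set Char) (c : Char) :
    c ∈ tocharsLoop rs cs ↔ c ∈ cs ∨ c ∈ (pairsRanges rs).map pyChr := by
  induction rs using pairsRanges.induct generalizing cs with
  | case1 r0 r1 rest ih =>
      rw [tocharsLoop, pairsRanges, ih]
      simp [PySem.Set.mem_union, List.mem_append, or_assoc]
  | case2 rs h =>
      rcases rs with _ | ⟨a, _ | ⟨b, t⟩⟩
      · simp [tocharsLoop, pairsRanges]
      · simp [tocharsLoop, pairsRanges]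
      · exact absurd rfl (fun he => h a b t he)

theorem nodup_tocharsLoop (rs : List Char) (cs : PySem.Set Char) (h : cs.Nodup) :
    (tocharsLoop rs cs).Nodup := by
  induction rs using pairsRanges.induct generalizing cs with
  | case1 r0 r1 rest ih =>
      rw [tocharsLoop]
      exact ih _ (PySem.Set.nodup_union _ _ h)
  | case2 rs hr =>
      rcases rs with _ | ⟨a, _ | ⟨b, t⟩⟩
      · simpa [tocharsLoop] using h
      · simpa [tocharsLoop] using h
      · exact absurd rfl (fun he => hr a b t he)

theorem mem_tocharsAltLoop (rs : List Char) (pts : PySem.Set Int) (n : Int) :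
    n ∈ tocharsAltLoop rs pts ↔ n ∈ pts ∨ n ∈ pairsRanges rs := by
  induction rs using pairsRanges.induct generalizing pts with
  | case1 r0 r1 rest ih =>
      rw [tocharsAltLoop, pairsRanges, ih]
      simp [PySem.Set.mem_update, List.mem_append, or_assoc]
  | case2 rs h =>
      rcases rs with _ | ⟨a, _ | ⟨b, t⟩⟩
      · simp [tocharsAltLoop, pairsRanges]
      · simp [tocharsAltLoop, pairsRanges]
      · exact absurd rfl (fun he => h a b t he)

theorem bounds_pairsRanges (rs : List Char) (h : rs.all pvDomChar = true) :
    ∀ n ∈ pairsRanges rs, 0 ≤ n ∧ n ≤ 126 := by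
  induction rs using pairsRanges.induct with
  | case1 r0 r1 rest ih =>
      intro n hn
      rw [pairsRanges] at hn
      rcases List.mem_append.1 hn with hn | hn
      · rw [PySem.List.mem_pyRange_one] at hn
        have h1 : pvDomChar r1 = true := by simp [List.all_eq_true] at h; tauto
        have : r1.toNat ≤ 126 := by simp [pvDomChar] at h1; omega
        simp only [pyOrd] at hn
        omega
      · exact ih (by simp [List.all_eq_true] at h ⊢; tauto) n hn
  | case2 rs hr =>
      rcases rs with _ | ⟨a, _ | ⟨b, t⟩⟩
      · intro n hn; simp [pairsRanges] at hn
      · intro n hn; simp [pairsRanges] at hn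
      · exact absurd rfl (fun he => hr a b t he)

theorem tochars_main : ∀ (chars : String) (ranges : String), Dom_tochars chars ranges → Pre_tochars chars ranges → tochars chars ranges = tochars_alt chars ranges := by
  intro chars ranges hd _hp
  unfold Dom_tochars at hd
  simp only [Bool.and_eq_true] at hd
  obtain ⟨hdc, hdr⟩ := hd
  set S := tocharsLoop ranges.toList (PySem.Set.ofList chars.toList) with hSdef
  set P := tocharsAltLoop ranges.toList (PySem.Set.ofList (chars.toList.map pyOrd)) with hPdef
  -- every code point in P is in [0,126]
  have hPb : ∀ n ∈ P, 0 ≤ n ∧ n ≤ 126 := by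
    intro n hn
    rw [hPdef, mem_tocharsAltLoop] at hn
    rcases hn with hn | hn
    · rw [PySem.Set.mem_ofList _ _, List.mem_map] at hn
      obtain ⟨c, hc, rfl⟩ := hn
      have : pvDomChar c = true := by
        simp [pvDomStr, List.all_eq_true] at hdc; exact hdc c hc
      simp [pvDomChar] at this
      simp only [pyOrd]
      omega
    · exact bounds_pairsRanges ranges.toList (by simpa [pvDomStr] using hdr) n hn
  -- membership bridge
  have hSP : ∀ c : Char, c ∈ S ↔ pyOrd c ∈ P := by
    intro c
    rw [hSdef, hPdef, mem_tocharsLoop, mem_tocharsAltLoop]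
    constructor
    · rintro (hc | hc)
      · rw [PySem.Set.mem_ofList _ _] at hc
        exact Or.inl ((PySem.Set.mem_ofList _ _).2 (List.mem_map_of_mem hc))
      · obtain ⟨n, hn, rfl⟩ := List.mem_map.1 hc
        have hb := bounds_pairsRanges ranges.toList (by simpa [pvDomStr] using hdr) n hn
        rw [pyOrd_pyChr n hb.1 hb.2]
        exact Or.inr hn
    · rintro (hc | hc)
      · rw [PySem.Set.mem_ofList _ _, List.mem_map] at hc
        obtain ⟨c', hc', he⟩ := hc
        have : c' = c := by
          have := congrArg pyChr he
          rwa [pyChr_pyOrd, pyChr_pyOrd] at this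
        exact Or.inl ((PySem.Set.mem_ofList _ _).2 (this ▸ hc'))
      · exact Or.inr (List.mem_map.2 ⟨pyOrd c, hc, pyChr_pyOrd c⟩)
  have hSnodup : S.Nodup := nodup_tocharsLoop _ _ (PySem.Set.nodup_ofList _)
  unfold tochars tochars_alt
  rw [← hSdef, ← hPdef]
  by_cases hPe : P = []
  · have hSe : S = [] := by
      rw [List.eq_nil_iff_forall_not_mem]
      intro c hc
      exact (List.eq_nil_iff_forall_not_mem.1 hPe) _ ((hSP c).1 hc)
    rw [hSe, if_pos hPe]
    rfl
  · rw [if_neg hPe]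
    rcases hmn : PySem.List.min? P (fun x => x) with _ | mn
    · exact absurd ((PySem.List.min?_eq_none_iff _ _).1 hmn) hPe
    rcases hmx : PySem.List.max? P (fun x => x) with _ | mx
    · exact absurd ((PySem.List.max?_eq_none_iff _ _).1 hmx) hPe
    simp only [Option.getD_some]
    congr 1
    -- the filtered, chr-mapped scan of [mn, mx] is exactly sorted(S)
    have hmnb := hPb mn (PySem.List.min?_mem hmn)
    have hmxb := hPb mx (PySem.List.max?_mem hmx)
    set LB := ((PySem.List.pyRange mn (mx + 1) 1).filter (fun c => P.contains c)).map pyChr with hLB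
    have hLBpw : LB.Pairwise (· < ·) := by
      rw [hLB]
      rw [List.pairwise_map]
      apply List.Pairwise.imp_of_mem ?_ ((PySem.List.pairwise_lt_pyRange_one mn (mx+1)).filter _)
      intro a b ha hb hab
      have ha' := PySem.List.mem_pyRange_one.1 (List.mem_of_mem_filter ha)
      have hb' := PySem.List.mem_pyRange_one.1 (List.mem_of_mem_filter hb)
      exact pyChr_lt_pyChr a b (by omega) hab (by omega)
    have hLBnodup : LB.Nodup := hLBpw.imp (fun h => ne_of_lt h)
    have hLBmem : ∀ c : Char, c ∈ LB ↔ c ∈ S := by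
      intro c
      rw [hSP, hLB]
      simp only [List.mem_map, List.mem_filter, PySem.List.mem_pyRange_one]
      constructor
      · rintro ⟨n, ⟨⟨h1, h2⟩, h3⟩, rfl⟩
        have hn : n ∈ P := by simpa using h3
        rwa [pyOrd_pyChr n (by omega) (by omega)]
      · intro hc
        refine ⟨pyOrd c, ⟨⟨PySem.List.min?_isMin hmn _ hc, ?_⟩, by simpa using hc⟩, pyChr_pyOrd c⟩
        have := PySem.List.max?_isMax hmx _ hc
        simp only at this
        omega
    apply PySem.List.sorted_eq_of_perm_of_pairwise_lt
    · exact (List.perm_ext_iff_of_nodup hLBnodup hSnodup).2 hLBmem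
    · exact hLBpw

-- ===== VERDICT (by name: the statement is the Claim_ definition above) =====
theorem tochars_spec : Claim_equal_tochars := by
  intro chars ranges hd hp
  exact tochars_main chars ranges hd hp
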